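-- pv_equiv track=rewrite | github.com/Brian08052/FYP | cgi-bin/DB.py | tooManyBlanks
-- ===== SOURCE A (Python) =====
-- def tooManyBlanks(sample):###
--     #Checks if the sample has 3 Nones in a row.
--
--     #Must be clearRecurrence() sample first!
--     i = 0
--     counter = 0
--     while i < len(sample):
--         if sample[i] == None:
--             counter+=1
--         else:
--             counter = 0
--         if counter == 3:
--             return True
--         i+= 1
--     return False
-- ===== SOURCE B (Python) =====
-- def tooManyBlanks(sample):
--     # Run-length decomposition: scan maximal runs of equal adjacent elements;
--     # True iff some run of None has length >= 3.
--     i = 0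
--     n = len(sample)
--     while i < n:
--         j = i
--         while j < n and sample[j] == sample[i]:
--             j += 1
--         if sample[i] == None and j - i >= 3:
--             return True
--         i = j
--     return False
-- ===== Notes on version B (the rewrite author's own statement) =====
-- stated objective: alternative
-- what changed: Replaces the per-element running counter (reset on non-None) by a run-length decomposition: an outer loop over maximal runs of equal adjacent elements, returning True when a None-run has length >= 3.
import Mathlib
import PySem

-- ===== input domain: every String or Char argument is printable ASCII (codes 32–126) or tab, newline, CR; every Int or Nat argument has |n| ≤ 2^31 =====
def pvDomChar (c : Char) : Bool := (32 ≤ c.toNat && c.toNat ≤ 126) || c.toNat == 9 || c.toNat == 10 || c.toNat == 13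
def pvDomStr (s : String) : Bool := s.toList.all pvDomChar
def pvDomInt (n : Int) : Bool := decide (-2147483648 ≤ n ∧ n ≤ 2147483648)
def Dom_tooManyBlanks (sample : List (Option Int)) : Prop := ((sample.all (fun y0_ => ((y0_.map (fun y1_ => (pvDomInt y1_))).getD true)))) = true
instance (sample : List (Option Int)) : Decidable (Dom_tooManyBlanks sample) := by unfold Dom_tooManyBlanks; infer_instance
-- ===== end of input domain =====

-- B replaces A's per-element running counter with a run-length decomposition over
-- maximal runs of equal adjacent elements (alternative decomposition, same cost).


-- ===== PORT A =====
-- A's while loop over indices, carrying the running counter; one element per step.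
def pvLoopA : List (Option Int) → Int → Bool
  | [], _ => false
  | x :: xs, counter =>
      let counter := if x == none then counter + 1 else 0
      if counter == 3 then true else pvLoopA xs counter

def tooManyBlanks (sample : List (Option Int)) : Bool := pvLoopA sample 0

-- ===== PORT B =====
-- inner while loop of B: length of the maximal run of k at the front, and the remainder
def pvRunLen (k : Option Int) : List (Option Int) → Nat × List (Option Int)
  | [] => (0, [])
  | x :: xs =>
      if x == k then
        let p := pvRunLen k xs
        (p.1 + 1, p.2)
      else (0, x :: xs)

theorem pvRunLen_len (k : Option Int) (xs : List (Option Int)) :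
    (pvRunLen k xs).2.length ≤ xs.length := by
  induction xs with
  | nil => simp [pvRunLen]
  | cons y ys ih =>
      by_cases h : (y == k) = true
      · simp [pvRunLen, h]; omega
      · simp [pvRunLen, h]

-- outer loop of B over maximal runs
def tooManyBlanks_alt : List (Option Int) → Bool
  | [] => false
  | x :: xs =>
      let p := pvRunLen x xs
      if x == none && decide (3 ≤ p.1 + 1) then true
      else tooManyBlanks_alt p.2
termination_by s => s.length
decreasing_by
  have := pvRunLen_len x xs
  simpa using Nat.lt_succ_of_le this

-- ===== PRECONDITION & SPEC =====
def Spec_tooManyBlanks (sample : List (Option Int)) (out : Bool) : Prop := out = tooManyBlanks_alt sample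
instance (sample : List (Option Int)) (out : Bool) : Decidable (Spec_tooManyBlanks sample out) := by unfold Spec_tooManyBlanks; infer_instance

-- ===== CLAIM (what is proved, stated in full; the proofs are below) =====
def Claim_equal_tooManyBlanks : Prop := ∀ (sample : List (Option Int)), Dom_tooManyBlanks sample → Spec_tooManyBlanks sample (tooManyBlanks sample)

-- ===== LEMMAS AND PROOFS =====

-- skipping a run of a non-None value leaves A's loop (at counter 0) unchanged
theorem pvLoopA_skip (k : Option Int) (hk : k ≠ none) :
    ∀ xs : List (Option Int), pvLoopA (pvRunLen k xs).2 0 = pvLoopA xs 0 := by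
  intro xs
  induction xs with
  | nil => rfl
  | cons y ys ih =>
      by_cases h : (y == k) = true
      · have hy : y = k := by simpa using h
        subst hy
        have hyn : (y == none) = false := by
          cases y with
          | none => exact absurd rfl hk
          | some a => rfl
        simp [pvRunLen, pvLoopA, hyn, ih]
      · simp [pvRunLen, h]

theorem main_eq : ∀ n (s : List (Option Int)), s.length ≤ n → pvLoopA s 0 = tooManyBlanks_alt s := by
  intro n
  induction n with
  | zero =>
      intro s hs
      have : s = [] := List.eq_nil_of_length_eq_zero (Nat.le_zero.mp hs)
      subst this
      simp [pvLoopA, tooManyBlanks_alt]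
  | succ n ih =>
      intro s hs
      match s with
      | [] => simp [pvLoopA, tooManyBlanks_alt]
      | some a :: xs =>
          have hk : (some a : Option Int) ≠ none := by simp
          have hlen : (pvRunLen (some a) xs).2.length ≤ n := by
            have := pvRunLen_len (some a) xs
            simp at hs; omega
          have hrec := ih _ hlen
          have hskip := pvLoopA_skip (some a) hk xs
          have hR : tooManyBlanks_alt (some a :: xs) = tooManyBlanks_alt (pvRunLen (some a) xs).2 := by
            rw [tooManyBlanks_alt]
            simp
          rw [hR, ← hrec, hskip]
          simp [pvLoopA]
      | none :: xs =>
          match xs with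
          | [] => simp [pvLoopA, tooManyBlanks_alt, pvRunLen]
          | some b :: ys =>
              have hlen : (some b :: ys).length ≤ n := by simp at hs ⊢; omega
              have hrec := ih _ hlen
              have hR : tooManyBlanks_alt (none :: some b :: ys) = tooManyBlanks_alt (some b :: ys) := by
                rw [tooManyBlanks_alt]
                simp [pvRunLen]
              rw [hR, ← hrec]
              simp [pvLoopA]
          | none :: ys =>
              match ys with
              | [] => simp [pvLoopA, tooManyBlanks_alt, pvRunLen]
              | some c :: zs =>
                  have hlen : (some c :: zs).length ≤ n := by simp at hs ⊢; omega
                  have hrec := ih _ hlen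
                  have hR : tooManyBlanks_alt (none :: none :: some c :: zs) = tooManyBlanks_alt (some c :: zs) := by
                    rw [tooManyBlanks_alt]
                    simp [pvRunLen]
                  rw [hR, ← hrec]
                  simp [pvLoopA]
              | none :: zs =>
                  have hR : tooManyBlanks_alt (none :: none :: none :: zs) = true := by
                    rw [tooManyBlanks_alt]
                    simp [pvRunLen]
                  rw [hR]
                  simp [pvLoopA]

-- ===== VERDICT (by name: the statement is the Claim_ definition above) =====
theorem tooManyBlanks_spec : Claim_equal_tooManyBlanks := by
  intro s _
  unfold Spec_tooManyBlanks tooManyBlanks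
  exact main_eq s.length s le_rfl
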